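-- pv_equiv track=rewrite | github.com/infraface/FDeID-Toolbox | scripts/run_visualization.py | flatten_list_arg
-- ===== SOURCE A (Python) =====
-- def flatten_list_arg(values):
--     """
--     Flatten a list that may contain comma-separated items.
--
--     Handles both space-separated (nargs='+') and comma-separated inputs:
--         ['a,b', 'c'] -> ['a', 'b', 'c']
--         ['a', 'b', 'c'] -> ['a', 'b', 'c']
--         ['a,b,c'] -> ['a', 'b', 'c']
--     """
--     result = []
--     for v in values:
--         for item in v.split(','):
--             item = item.strip()
--             if item:
--                 result.append(item)
--     return result
-- ===== SOURCE B (Python) =====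
-- def flatten_list_arg(values):
--     # Concatenate-first variant: one join, one split, one filter pass.
--     result = []
--     for token in ','.join(values).split(','):
--         token = token.strip()
--         if token:
--             result.append(token)
--     return result
-- ===== Notes on version B (the rewrite author's own statement) =====
-- stated objective: simpler
-- what changed: B joins all elements with commas into one string, splits that string once, and filters the stripped tokens in a single pass, instead of A's nested per-element split loop.
import Mathlib
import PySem

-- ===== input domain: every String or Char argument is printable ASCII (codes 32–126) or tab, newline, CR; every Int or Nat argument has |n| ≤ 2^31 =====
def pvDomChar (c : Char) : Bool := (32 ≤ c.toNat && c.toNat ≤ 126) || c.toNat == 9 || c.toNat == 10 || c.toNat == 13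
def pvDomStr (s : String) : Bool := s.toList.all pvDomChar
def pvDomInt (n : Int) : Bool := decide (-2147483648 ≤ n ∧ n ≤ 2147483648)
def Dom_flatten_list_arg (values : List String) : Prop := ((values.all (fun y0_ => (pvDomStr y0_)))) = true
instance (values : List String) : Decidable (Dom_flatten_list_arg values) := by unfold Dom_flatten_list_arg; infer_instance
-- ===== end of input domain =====

-- B builds one comma-joined string, splits it once and filters stripped tokens in a single
-- pass, replacing A's nested per-element split loop (objective: simpler decomposition).


-- ===== PORT A =====
-- literal port of A: for v in values: for item in v.split(','): item = item.strip(); if item: append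
def flatten_list_arg (values : List String) : List String :=
  values.foldl
    (fun result v =>
      (PySem.Chars.splitOn v.toList [',']).foldl
        (fun result item =>
          let item := PySem.Chars.strip item
          if item ≠ [] then result ++ [String.ofList item] else result)
        result)
    []

-- ===== PORT B =====
-- literal port of B: tokens = ','.join(values).split(','); one filter pass over tokens
def flatten_list_arg_alt (values : List String) : List String :=
  let joined := PySem.Chars.join [','] (values.map String.toList)
  let tokens := PySem.Chars.splitOn joined [',']
  tokens.foldl
    (fun result token =>
      let token := PySem.Chars.strip token
      if token ≠ [] then result ++ [String.ofList token] else result)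
    []

-- ===== PRECONDITION & SPEC =====
def Spec_flatten_list_arg (values : List String) (out : List String) : Prop := out = flatten_list_arg_alt values
instance (values : List String) (out : List String) : Decidable (Spec_flatten_list_arg values out) := by unfold Spec_flatten_list_arg; infer_instance

-- ===== CLAIM (what is proved, stated in full; the proofs are below) =====
def Claim_equal_flatten_list_arg : Prop := ∀ (values : List String), Dom_flatten_list_arg values → Spec_flatten_list_arg values (flatten_list_arg values)

-- ===== LEMMAS AND PROOFS =====

-- simple accumulator recursion computing Python's s.split(',') for the proofs below
def splitAux (l cur : List Char) : List (List Char) :=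
  match l with
  | [] => [cur.reverse]
  | c :: rest => if c = ',' then cur.reverse :: splitAux rest [] else splitAux rest (c :: cur)

theorem go_eq (fuel : Nat) (l cur : List Char) (acc : List (List Char))
    (h : l.length < fuel) :
    PySem.Chars.splitOn.go [','] fuel l cur acc = acc.reverse ++ splitAux l cur := by
  induction fuel generalizing l cur acc with
  | zero => omega
  | succ n ih =>
    cases l with
    | nil => simp [PySem.Chars.splitOn.go, splitAux]
    | cons c rest =>
      rw [PySem.Chars.splitOn.go]
      by_cases hc : c = ','
      · subst hc
        have hp : List.isPrefixOf [','] (',' :: rest) = true := by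
          simp
        rw [hp]
        simp only [if_true, splitAux, List.length_cons, List.drop_succ_cons,
          List.length_nil, List.drop_zero]
        rw [ih rest [] _ (by simpa using h)]
        simp
      · have hp : List.isPrefixOf [','] (c :: rest) = false := by
          simp only [Bool.eq_false_iff, Ne, List.isPrefixOf_iff_prefix, List.cons_prefix_cons]
          tauto
        rw [hp]
        simp only [Bool.false_eq_true, if_false, splitAux, if_neg hc]
        exact ih rest (c :: cur) acc (by simpa using h)

theorem splitOn_comma (l : List Char) : PySem.Chars.splitOn l [','] = splitAux l [] := by
  rw [PySem.Chars.splitOn, go_eq (l.length + 1) l [] [] (by omega)]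
  simp

theorem splitAux_append (a b cur : List Char) :
    splitAux (a ++ ',' :: b) cur = splitAux a cur ++ splitAux b [] := by
  induction a generalizing cur with
  | nil => simp [splitAux]
  | cons c rest ih =>
    by_cases hc : c = ',' <;> simp [splitAux, hc, ih]

theorem join_cons₂ (v w : List Char) (rest : List (List Char)) :
    PySem.Chars.join [','] (v :: w :: rest) = v ++ ',' :: PySem.Chars.join [','] (w :: rest) := by
  simp [PySem.Chars.join, List.intercalate, List.intersperse]

theorem splitAux_join (vs : List (List Char)) (hne : vs ≠ []) :
    splitAux (PySem.Chars.join [','] vs) [] = vs.flatMap (fun v => splitAux v []) := by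
  induction vs with
  | nil => simp at hne
  | cons v rest ih =>
    cases rest with
    | nil => simp [PySem.Chars.join, List.intercalate]
    | cons w rest' =>
      rw [join_cons₂, splitAux_append, ih (by simp)]
      simp

-- ===== VERDICT (by name: the statement is the Claim_ definition above) =====
theorem flatten_list_arg_spec : Claim_equal_flatten_list_arg := by
  unfold Claim_equal_flatten_list_arg
  intro values _
  unfold Spec_flatten_list_arg
  cases values with
  | nil => rfl
  | cons v rest =>
    simp only [flatten_list_arg, flatten_list_arg_alt, splitOn_comma]
    rw [splitAux_join _ (by simp), List.foldl_flatMap, List.foldl_map]
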